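-- pv_equiv track=rewrite | github.com/HUMBLE25/morgorithm | 프로그래머스/1/42862. 체육복/체육복.py | solution
-- ===== SOURCE A (Python) =====
-- def solution(n, lost, reserve):
--     # 도난당한 학생과 여벌 체육복이 있는 학생의 중복을 제거합니다.
--     lost_set = set(lost)
--     reserve_set = set(reserve)
--
--     # 중복 제거
--     real_lost = lost_set - reserve_set
--     real_reserve = reserve_set - lost_set
--
--     # 빌려주기 과정
--     for r in sorted(real_reserve):
--         if r-1 in real_lost:
--             real_lost.remove(r-1)
--         elif r+1 in real_lost:
--             real_lost.remove(r+1)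
--
--     # 체육수업을 들을 수 있는 학생 수 계산
--     return n - len(real_lost)
-- ===== SOURCE B (Python) =====
-- def solution(n, lost, reserve):
--     # Two-pointer merge over the sorted deduplicated lost/reserve lists
--     # instead of a per-reserve membership scan of a set.
--     ls = sorted(set(lost) - set(reserve))
--     rs = sorted(set(reserve) - set(lost))
--     i = j = matched = 0
--     while i < len(ls) and j < len(rs):
--         if rs[j] < ls[i] - 1:
--             j += 1
--         elif rs[j] > ls[i] + 1:
--             i += 1
--         else:
--             matched += 1
--             i += 1
--             j += 1
--     return n - (len(ls) - matched)
-- ===== Notes on version B (the rewrite author's own statement) =====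
-- stated objective: alternative
-- what changed: Replaces A's loop over sorted reserves with per-step set membership tests and removals by a two-pointer merge of the two sorted deduplicated lost/reserve lists that counts matches in one linear scan.
import Mathlib
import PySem

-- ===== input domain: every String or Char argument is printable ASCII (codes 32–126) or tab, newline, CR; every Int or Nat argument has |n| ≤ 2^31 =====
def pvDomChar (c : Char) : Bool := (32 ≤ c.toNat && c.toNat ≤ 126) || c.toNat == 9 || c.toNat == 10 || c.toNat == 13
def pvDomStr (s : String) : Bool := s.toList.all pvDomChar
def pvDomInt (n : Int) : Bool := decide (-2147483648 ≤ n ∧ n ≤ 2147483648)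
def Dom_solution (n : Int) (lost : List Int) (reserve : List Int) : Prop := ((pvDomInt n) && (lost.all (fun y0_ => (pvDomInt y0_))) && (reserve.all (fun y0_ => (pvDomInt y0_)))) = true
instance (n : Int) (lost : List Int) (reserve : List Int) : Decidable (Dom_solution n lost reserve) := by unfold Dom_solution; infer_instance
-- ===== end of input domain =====

-- B replaces A's per-reserve set-membership greedy by a two-pointer merge of the two
-- sorted deduplicated lists (objective: alternative traversal, same greedy count).

-- ===== PORT A =====
-- one iteration of A's for-loop body; 'real_lost.remove(x)' runs only after 'x in real_lost',
-- where Python's set.remove coincides with Set.discard (exact)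
def solStep (s : PySem.Set Int) (r : Int) : PySem.Set Int :=
  if PySem.Set.contains s (r - 1) then PySem.Set.discard s (r - 1)
  else if PySem.Set.contains s (r + 1) then PySem.Set.discard s (r + 1)
  else s

def solution (n : Int) (lost : List Int) (reserve : List Int) : Int :=
  let lostSet : PySem.Set Int := PySem.Set.ofList lost
  let reserveSet : PySem.Set Int := PySem.Set.ofList reserve
  let realLost := PySem.Set.diff lostSet reserveSet
  let realReserve := PySem.Set.diff reserveSet lostSet
  let finalLost := (PySem.List.sorted realReserve (fun x => x) false).foldl solStep realLost
  n - PySem.Set.len finalLost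

-- ===== PORT B =====
-- the while loop of Source B: advancing a pointer = dropping the head of that list
def twoPointer : List Int → List Int → Int
  | _, [] => 0
  | [], _ :: _ => 0
  | l :: ls, r :: rs =>
    if r < l - 1 then twoPointer (l :: ls) rs
    else if r > l + 1 then twoPointer ls (r :: rs)
    else 1 + twoPointer ls rs
termination_by ls rs => ls.length + rs.length

def solution_alt (n : Int) (lost : List Int) (reserve : List Int) : Int :=
  let ls := PySem.List.sorted (PySem.Set.diff (PySem.Set.ofList lost) (PySem.Set.ofList reserve)) (fun x => x) false
  let rs := PySem.List.sorted (PySem.Set.diff (PySem.Set.ofList reserve) (PySem.Set.ofList lost)) (fun x => x) false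
  n - ((ls.length : Int) - twoPointer ls rs)

-- ===== PRECONDITION & SPEC =====
def Spec_solution (n : Int) (lost : List Int) (reserve : List Int) (out : Int) : Prop := out = solution_alt n lost reserve
instance (n : Int) (lost : List Int) (reserve : List Int) (out : Int) : Decidable (Spec_solution n lost reserve out) := by unfold Spec_solution; infer_instance

-- ===== CLAIM (what is proved, stated in full; the proofs are below) =====
def Claim_equal_solution : Prop := ∀ (n : Int) (lost : List Int) (reserve : List Int), Dom_solution n lost reserve → Spec_solution n lost reserve (solution n lost reserve)

-- ===== LEMMAS AND PROOFS =====

theorem solStep_perm {s s' : PySem.Set Int} (h : s.Perm s') (r : Int) :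
    (solStep s r).Perm (solStep s' r) := by
  have hc : ∀ x : Int, PySem.Set.contains s x = PySem.Set.contains s' x := by
    intro x
    rw [Bool.eq_iff_iff]
    constructor <;> intro hx
    · exact (PySem.Set.contains_iff _ _).mpr (h.mem_iff.mp ((PySem.Set.contains_iff _ _).mp hx))
    · exact (PySem.Set.contains_iff _ _).mpr (h.mem_iff.mpr ((PySem.Set.contains_iff _ _).mp hx))
  unfold solStep
  rw [hc (r - 1), hc (r + 1)]
  split_ifs <;> first | exact h.filter _ | exact h

theorem foldl_solStep_perm {s s' : PySem.Set Int} (h : s.Perm s') (R : List Int) :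
    (R.foldl solStep s).Perm (R.foldl solStep s') := by
  induction R generalizing s s' with
  | nil => exact h
  | cons r rs ih => exact ih (solStep_perm h r)

theorem contains_eq_false_of_not_mem {s : PySem.Set Int} {x : Int} (h : x ∉ s) :
    PySem.Set.contains s x = false := by
  cases hc : PySem.Set.contains s x with
  | false => rfl
  | true => exact absurd ((PySem.Set.contains_iff _ _).mp hc) h

theorem solStep_id {s : PySem.Set Int} {r : Int} (h1 : r - 1 ∉ s) (h2 : r + 1 ∉ s) :
    solStep s r = s := by
  unfold solStep
  rw [contains_eq_false_of_not_mem h1, contains_eq_false_of_not_mem h2]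
  simp

-- step on l :: ls ignores the head when r-1 and r+1 differ from l
theorem solStep_cons {l : Int} {ls : List Int} {r : Int} (h1 : r - 1 ≠ l) (h2 : r + 1 ≠ l) :
    solStep (l :: ls) r = l :: solStep ls r := by
  unfold solStep
  have c1 : PySem.Set.contains (l :: ls) (r - 1) = PySem.Set.contains ls (r - 1) := by
    rw [Bool.eq_iff_iff, PySem.Set.contains_iff, PySem.Set.contains_iff]
    constructor
    · intro h
      rcases List.mem_cons.mp h with h | h
      · exact absurd h h1
      · exact h
    · exact fun h => List.mem_cons_of_mem _ h
  have c2 : PySem.Set.contains (l :: ls) (r + 1) = PySem.Set.contains ls (r + 1) := by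
    rw [Bool.eq_iff_iff, PySem.Set.contains_iff, PySem.Set.contains_iff]
    constructor
    · intro h
      rcases List.mem_cons.mp h with h | h
      · exact absurd h h2
      · exact h
    · exact fun h => List.mem_cons_of_mem _ h
  rw [c1, c2]
  have d1 : PySem.Set.discard (l :: ls) (r - 1) = l :: PySem.Set.discard ls (r - 1) := by
    simp only [PySem.Set.discard, List.filter_cons]
    have : (!(l == r - 1)) = true := by simp; omega
    rw [this, if_pos rfl]
  have d2 : PySem.Set.discard (l :: ls) (r + 1) = l :: PySem.Set.discard ls (r + 1) := by
    simp only [PySem.Set.discard, List.filter_cons]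
    have : (!(l == r + 1)) = true := by simp; omega
    rw [this, if_pos rfl]
  split_ifs <;> simp [d1, d2]

theorem foldl_solStep_cons {l : Int} {R : List Int} (hR : ∀ r ∈ R, r - 1 ≠ l ∧ r + 1 ≠ l)
    (ls : List Int) : R.foldl solStep (l :: ls) = l :: R.foldl solStep ls := by
  induction R generalizing ls with
  | nil => rfl
  | cons r rs ih =>
    have h := hR r (by simp)
    simp only [List.foldl_cons, solStep_cons h.1 h.2]
    exact ih (fun r' hr' => hR r' (by simp [hr'])) _

theorem solStep_cons_matched {l : Int} {ls : List Int} {r : Int}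
    (hls : ∀ x ∈ ls, l < x) (hr : r = l - 1 ∨ r = l + 1) :
    solStep (l :: ls) r = ls := by
  have hnm : ∀ y : Int, y < l → PySem.Set.contains (l :: ls) y = false := by
    intro y hy
    apply contains_eq_false_of_not_mem
    intro hmem
    rcases List.mem_cons.mp hmem with h | h
    · omega
    · exact absurd (hls y h) (by omega)
  have hdis : PySem.Set.discard (l :: ls) l = ls := by
    simp only [PySem.Set.discard, List.filter_cons]
    simp only [BEq.rfl, Bool.not_true]
    exact List.filter_eq_self.mpr (fun x hx => by
      have := hls x hx; simp; omega)
  have hcl : PySem.Set.contains (l :: ls) l = true := by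
    exact (PySem.Set.contains_iff _ _).mpr (by simp)
  rcases hr with h | h <;> subst h <;> unfold solStep
  · rw [hnm (l - 1 - 1) (by omega)]
    simp only [Bool.false_eq_true, if_false]
    rw [show l - 1 + 1 = l by ring, hcl, if_pos rfl, hdis]
  · rw [show l + 1 - 1 = l by ring, hcl, if_pos rfl, hdis]

theorem foldl_solStep_nil (R : List Int) : R.foldl solStep ([] : List Int) = [] := by
  induction R with
  | nil => rfl
  | cons r rs ih =>
    have : solStep ([] : List Int) r = [] := by
      unfold solStep
      simp [PySem.Set.contains]
    simp [this, ih]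

-- the central invariant: on sorted, strictly increasing, disjoint lists the fold of A's
-- loop body leaves exactly  |L| - twoPointer L R  students without a uniform
theorem main_count (L R : List Int) (hL : L.Pairwise (· < ·)) (hR : R.Pairwise (· < ·))
    (hd : ∀ x ∈ L, x ∉ R) :
    ((R.foldl solStep L).length : Int) = (L.length : Int) - twoPointer L R := by
  induction L, R using twoPointer.induct with
  | case1 L => simp [twoPointer]
  | case2 r rs =>
    rw [foldl_solStep_nil]
    simp [twoPointer]
  | case3 l ls r rs hlt ih =>
    -- r < l - 1 : reserve r helps nobody
    have hmin : ∀ x ∈ l :: ls, l ≤ x := by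
      intro x hx
      rcases List.mem_cons.mp hx with h | h
      · omega
      · exact le_of_lt (List.rel_of_pairwise_cons hL h)
    have hid : solStep (l :: ls) r = (l :: ls) := by
      apply solStep_id
      · intro h; have := hmin _ h; omega
      · intro h; have := hmin _ h; omega
    rw [List.foldl_cons, hid, twoPointer]
    rw [if_pos hlt]
    exact ih hL hR.tail (fun x hx hmem => hd x hx (by simp [hmem]))
  | case4 l ls r rs hlt hgt ih =>
    -- r > l + 1 : lost l can never be helped, head is preserved
    have hRlow : ∀ r' ∈ r :: rs, r' - 1 ≠ l ∧ r' + 1 ≠ l := by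
      intro r' hr'
      rcases List.mem_cons.mp hr' with h | h
      · omega
      · have := List.rel_of_pairwise_cons hR h; omega
    rw [foldl_solStep_cons hRlow, twoPointer]
    rw [if_neg hlt, if_pos hgt]
    have := ih hL.tail hR (fun x hx hmem => hd x (by simp [hx]) hmem)
    simp only [List.length_cons]
    push_cast
    omega
  | case5 l ls r rs hlt hgt ih =>
    -- l - 1 ≤ r ≤ l + 1 and r ≠ l : a match
    have hne : r ≠ l := fun h => hd l (by simp) (by simp [h.symm])
    have hstep : solStep (l :: ls) r = ls := by
      apply solStep_cons_matched (fun x hx => List.rel_of_pairwise_cons hL hx)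
      omega
    rw [List.foldl_cons, hstep, twoPointer]
    rw [if_neg hlt, if_neg hgt]
    have := ih hL.tail hR.tail (fun x hx hmem => hd x (by simp [hx]) (by simp [hmem]))
    simp only [List.length_cons]
    push_cast
    omega

theorem pairwise_lt_sorted {xs : List Int} (h : xs.Nodup) :
    (PySem.List.sorted xs (fun x => x) false).Pairwise (· < ·) := by
  have h1 : (PySem.List.sorted xs (fun x => x) false).Pairwise (· ≤ ·) :=
    PySem.List.sorted_pairwise xs (fun x => x)
  have h2 : (PySem.List.sorted xs (fun x => x) false).Nodup :=
    (PySem.List.sorted_perm xs (fun x => x) false).nodup_iff.mpr h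
  exact (h1.and h2).imp (fun hab => lt_of_le_of_ne hab.1 hab.2)

-- ===== VERDICT (by name: the statement is the Claim_ definition above) =====
theorem solution_spec : Claim_equal_solution := by
  intro n lost reserve _
  show solution n lost reserve = solution_alt n lost reserve
  unfold solution solution_alt
  simp only []
  set RL := PySem.Set.diff (PySem.Set.ofList lost) (PySem.Set.ofList reserve) with hRL
  set RR := PySem.Set.diff (PySem.Set.ofList reserve) (PySem.Set.ofList lost) with hRR
  set sRL := PySem.List.sorted RL (fun x => x) false with hsRL
  set sRR := PySem.List.sorted RR (fun x => x) false with hsRR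
  have hnodupRL : RL.Nodup := PySem.Set.nodup_diff _ _ (PySem.Set.nodup_ofList lost)
  have hnodupRR : RR.Nodup := PySem.Set.nodup_diff _ _ (PySem.Set.nodup_ofList reserve)
  have hperm : (sRR.foldl solStep RL).Perm (sRR.foldl solStep sRL) :=
    foldl_solStep_perm (PySem.List.sorted_perm RL (fun x => x) false).symm sRR
  have hdisj : ∀ x ∈ sRL, x ∉ sRR := by
    intro x hx hx'
    have h1 : x ∈ RL := (PySem.List.sorted_perm RL (fun x => x) false).mem_iff.mp hx
    have h2 : x ∈ RR := (PySem.List.sorted_perm RR (fun x => x) false).mem_iff.mp hx'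
    have m1 := (PySem.Set.mem_diff _ _ _).mp h1
    have m2 := (PySem.Set.mem_diff _ _ _).mp h2
    exact m1.2 m2.1
  have hmain := main_count sRL sRR (pairwise_lt_sorted hnodupRL) (pairwise_lt_sorted hnodupRR) hdisj
  have hlen1 : (sRR.foldl solStep RL).length = (sRR.foldl solStep sRL).length := hperm.length_eq
  have hlen2 : sRL.length = RL.length := (PySem.List.sorted_perm RL (fun x => x) false).length_eq
  simp only [PySem.Set.len]
  omega
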